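-- pv_equiv track=rewrite | github.com/skitela/potential-robot | BIN/infobot.py | _should_alert
-- ===== SOURCE A (Python) =====
-- from typing import Dict, Optional
--
-- def _should_alert(status: Dict[str, Dict[str, object]]) -> Optional[str]:
--     for name, st in status.items():
--         if name not in ("safetybot", "scudfab02"):
--             continue
--         if (not st.get("lock")) and (not st.get("log_ok")):
--             return "critical"
--         if not st.get("lock"):
--             return "critical"
--         if not st.get("log_ok"):
--             return "critical"
--     return None
-- ===== SOURCE B (Python) =====
-- from typing import Dict, Optional
--
-- _WATCHED = ("safetybot", "scudfab02")
--
-- def _should_alert(status: Dict[str, Dict[str, object]]) -> Optional[str]: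
--     for name in _WATCHED:
--         if name in status:
--             st = status[name]
--             if not st.get("lock") or not st.get("log_ok"):
--                 return "critical"
--     return None
-- ===== Notes on version B (the rewrite author's own statement) =====
-- stated objective: simpler
-- what changed: B loops over the fixed two-name watch tuple with direct dict lookups instead of scanning every item of the status dict, and collapses A's three redundant branches into one condition.
import Mathlib
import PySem

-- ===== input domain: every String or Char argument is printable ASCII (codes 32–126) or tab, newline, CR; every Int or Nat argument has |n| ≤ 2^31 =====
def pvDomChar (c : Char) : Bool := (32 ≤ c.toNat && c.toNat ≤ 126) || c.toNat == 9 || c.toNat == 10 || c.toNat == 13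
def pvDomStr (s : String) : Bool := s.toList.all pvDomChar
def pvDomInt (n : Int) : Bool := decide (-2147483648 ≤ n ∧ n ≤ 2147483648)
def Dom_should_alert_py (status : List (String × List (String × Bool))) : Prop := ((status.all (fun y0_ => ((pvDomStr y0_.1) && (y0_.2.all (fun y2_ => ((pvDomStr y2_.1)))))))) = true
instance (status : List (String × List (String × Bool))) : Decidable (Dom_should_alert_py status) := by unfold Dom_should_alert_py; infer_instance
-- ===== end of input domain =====

-- B replaces A's full scan of the status dict by direct lookups of the two fixed
-- watched names and collapses A's three redundant branches into one (objective: simpler).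

-- ===== PORT A =====
-- st.get(k) truthiness: a missing key is falsy (None), a present Bool is its own truth value.
def pvTruthyGet (st : List (String × Bool)) (k : String) : Bool :=
  (st.lookup k).getD false

def pvALoop : List (String × List (String × Bool)) → Option String
  | [] => none
  | (name, st) :: rest =>
    if name ≠ "safetybot" ∧ name ≠ "scudfab02" then pvALoop rest
    else if (!pvTruthyGet st "lock") && (!pvTruthyGet st "log_ok") then some "critical"
    else if !pvTruthyGet st "lock" then some "critical"
    else if !pvTruthyGet st "log_ok" then some "critical"
    else pvALoop rest

def should_alert_py (status : List (String × List (String × Bool))) : Option String :=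
  pvALoop status

-- ===== PORT B =====
def pvBadStatus (st : List (String × Bool)) : Bool :=
  (!pvTruthyGet st "lock") || (!pvTruthyGet st "log_ok")

def pvBLoop (status : List (String × List (String × Bool))) : List String → Option String
  | [] => none
  | n :: ns =>
    match status.lookup n with            -- 'if n in status: st = status[n]'
    | some st => if pvBadStatus st then some "critical" else pvBLoop status ns
    | none => pvBLoop status ns

def should_alert_py_alt (status : List (String × List (String × Bool))) : Option String :=
  pvBLoop status ["safetybot", "scudfab02"]

-- ===== PRECONDITION & SPEC =====
-- Pre_ excludes association lists in which a watched key occurs more than once: a real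
-- Python dict cannot contain duplicate keys, and on such lists A scans every duplicate
-- binding while B reads only the first one.
def Pre_should_alert_py (status : List (String × List (String × Bool))) : Prop :=
  (status.map Prod.fst).count "safetybot" ≤ 1 ∧ (status.map Prod.fst).count "scudfab02" ≤ 1

instance (status : List (String × List (String × Bool))) : Decidable (Pre_should_alert_py status) := by
  unfold Pre_should_alert_py; infer_instance

def pvWitness_should_alert_py : (List (String × List (String × Bool))) :=
  [("safetybot", [("lock", true), ("log_ok", true)]), ("scudfab02", [("lock", true)])]

def Spec_should_alert_py (status : List (String × List (String × Bool))) (out : Option String) : Prop := out = should_alert_py_alt status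
instance (status : List (String × List (String × Bool))) (out : Option String) : Decidable (Spec_should_alert_py status out) := by unfold Spec_should_alert_py; infer_instance

-- ===== CLAIM (what is proved, stated in full; the proofs are below) =====
def Claim_equal_should_alert_py : Prop := ∀ (status : List (String × List (String × Bool))), Dom_should_alert_py status → Pre_should_alert_py status → Spec_should_alert_py status (should_alert_py status)

-- ===== LEMMAS AND PROOFS =====
def pvWatched (n : String) : Bool := n == "safetybot" || n == "scudfab02"

-- A returns "critical" iff some watched entry of the list is bad.
theorem pvALoop_char (s : List (String × List (String × Bool))) :
    pvALoop s = if s.any (fun p => pvWatched p.1 && pvBadStatus p.2) then some "critical" else none := by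
  induction s with
  | nil => simp [pvALoop]
  | cons p rest ih =>
    obtain ⟨name, st⟩ := p
    simp only [List.any_cons]
    by_cases hw : name ≠ "safetybot" ∧ name ≠ "scudfab02"
    · have hC : (pvWatched name && pvBadStatus st) = false := by
        simp [pvWatched, hw.1, hw.2]
      simp only [pvALoop, if_pos hw, hC, Bool.false_or, ih]
    · have hwt : pvWatched name = true := by
        unfold pvWatched
        rcases not_and_or.mp hw with h | h
        · simp [not_not.mp h]
        · simp [not_not.mp h]
      cases hl : pvTruthyGet st "lock" <;> cases hg : pvTruthyGet st "log_ok"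
      · simp [pvALoop, if_neg hw, hl, hg, hwt, pvBadStatus]
      · simp [pvALoop, if_neg hw, hl, hg, hwt, pvBadStatus]
      · simp [pvALoop, if_neg hw, hl, hg, hwt, pvBadStatus]
      · have hC : (pvWatched name && pvBadStatus st) = false := by
          simp [pvBadStatus, hl, hg]
        have hstep : pvALoop ((name, st) :: rest) = pvALoop rest := by
          simp [pvALoop, hl, hg]
        rw [hstep, ih]
        simp only [hC, Bool.false_or]

theorem pvAny_keyed_nil (s : List (String × List (String × Bool))) (n : String)
    (h : (s.map Prod.fst).count n = 0) (g : List (String × Bool) → Bool) :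
    s.any (fun p => p.1 == n && g p.2) = false := by
  induction s with
  | nil => simp
  | cons p rest ih =>
    simp only [List.map_cons, List.count_cons] at h
    by_cases hk : p.1 = n
    · simp [hk] at h
    · have hbe : (p.1 == n) = false := beq_eq_false_iff_ne.mpr hk
      simp only [List.any_cons, hbe, Bool.false_and, Bool.false_or]
      exact ih (by omega)

theorem pvAny_keyed_lookup (s : List (String × List (String × Bool))) (n : String)
    (h : (s.map Prod.fst).count n ≤ 1) :
    s.any (fun p => p.1 == n && pvBadStatus p.2)
      = match s.lookup n with
        | some st => pvBadStatus st
        | none => false := by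
  induction s with
  | nil => simp
  | cons p rest ih =>
    simp only [List.map_cons, List.count_cons] at h
    by_cases hk : p.1 = n
    · have h0 : (rest.map Prod.fst).count n = 0 := by simp [hk] at h; omega
      simp [List.lookup, hk, pvAny_keyed_nil rest n h0]
    · have hbe : (p.1 == n) = false := beq_eq_false_iff_ne.mpr hk
      have hbk : (n == p.1) = false := beq_eq_false_iff_ne.mpr (Ne.symm hk)
      simp only [List.any_cons, hbe, Bool.false_and, Bool.false_or, List.lookup, hbk]
      exact ih (by omega)

theorem pvAny_split (s : List (String × List (String × Bool))) :
    s.any (fun p => pvWatched p.1 && pvBadStatus p.2)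
      = (s.any (fun p => p.1 == "safetybot" && pvBadStatus p.2)
          || s.any (fun p => p.1 == "scudfab02" && pvBadStatus p.2)) := by
  induction s with
  | nil => simp
  | cons p rest ih =>
    simp only [List.any_cons]
    rw [ih]
    cases hb : pvBadStatus p.2 <;> cases hx : (p.1 == "safetybot") <;>
      cases hy : (p.1 == "scudfab02") <;>
        simp [pvWatched, hx, hy]

-- ===== VERDICT (by name: the statement is the Claim_ definition above) =====
theorem should_alert_py_spec : Claim_equal_should_alert_py := by
  intro status _ hpre
  obtain ⟨h1, h2⟩ := hpre
  show should_alert_py status = should_alert_py_alt status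
  unfold should_alert_py should_alert_py_alt
  rw [pvALoop_char]
  rw [pvAny_split, pvAny_keyed_lookup status "safetybot" h1, pvAny_keyed_lookup status "scudfab02" h2]
  simp only [pvBLoop]
  cases hl1 : status.lookup "safetybot" <;> cases hl2 : status.lookup "scudfab02" <;>
    · simp only []
      split_ifs <;> simp_all
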